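-- pv_equiv track=rewrite | github.com/Thitatpon-Niwatwong/edabit | Sort Names According to the Length of Their Last Names.py | last_name_lensort
-- ===== SOURCE A (Python) =====
-- def last_name_lensort(names):
--     final = {}
--     Final = []
--
--     for a in names:
--         last_name = a.split()[-1]
--         final[last_name] = len(last_name)
--
--     final_sorted = sorted(final.items(), key=lambda x: (x[1], x[0]))
--
--     for last_name, _ in final_sorted:
--         for name in names:
--             if last_name == name.split()[-1]:
--                 Final.append(name)
--
--     return Final
-- ===== SOURCE B (Python) =====
-- def last_name_lensort(names):
--     groups = {}
--     for name in names:
--         groups.setdefault(name.split()[-1], []).append(name)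
--     result = []
--     for last in sorted(groups.keys(), key=lambda last: (len(last), last)):
--         result.extend(groups[last])
--     return result
-- ===== Notes on version B (the rewrite author's own statement) =====
-- stated objective: faster
-- what changed: Replaces A's dedup-dict of lengths plus a rescan of the whole names list for every distinct last name with a single grouping pass into buckets keyed by last name, then a sort of the keys and one concatenation of the buckets.
import Mathlib
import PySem

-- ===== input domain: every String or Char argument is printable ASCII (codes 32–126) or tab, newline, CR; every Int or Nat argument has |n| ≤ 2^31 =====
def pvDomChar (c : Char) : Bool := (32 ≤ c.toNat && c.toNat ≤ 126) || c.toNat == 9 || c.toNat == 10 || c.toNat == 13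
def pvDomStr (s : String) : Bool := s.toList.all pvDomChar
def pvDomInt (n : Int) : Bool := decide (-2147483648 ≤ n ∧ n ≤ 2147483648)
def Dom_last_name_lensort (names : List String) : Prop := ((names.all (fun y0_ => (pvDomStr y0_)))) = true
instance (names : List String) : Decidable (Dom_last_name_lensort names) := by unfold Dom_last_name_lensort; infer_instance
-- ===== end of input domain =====

-- B replaces A's per-distinct-last-name rescan of the whole list with one grouping pass into
-- buckets plus a key sort (objective: faster).


-- ===== PORT A =====
-- name.split()[-1]; the default "" is never reached under Pre_ (Python raises IndexError there)
def pvLast (s : String) : String := PySem.List.pyGetD (PySem.Str.split₀ s) (-1) ""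

def last_name_lensort (names : List String) : List String :=
  let final : PySem.Dict String Int :=
    names.foldl (fun d a => d.insert (pvLast a) (PySem.Str.len (pvLast a))) PySem.Dict.empty
  let final_sorted := PySem.List.sorted2 final.items (fun x => x.2) (fun x => x.1)
  final_sorted.foldl (fun Final p =>
    names.foldl (fun F name => if p.1 == pvLast name then F ++ [name] else F) Final) []

-- ===== PORT B =====
def last_name_lensort_alt (names : List String) : List String :=
  let groups : PySem.Dict String (List String) :=
    names.foldl (fun d name => d.modify (pvLast name) [] (fun l => l ++ [name])) PySem.Dict.empty
  (PySem.List.sorted2 groups.keys (fun last => PySem.Str.len last) (fun last => last)).foldl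
    (fun result last => result ++ groups.getD last []) []

-- ===== PRECONDITION & SPEC =====
-- Pre_ excludes exactly the inputs containing a name whose split() is empty (empty or
-- whitespace-only string), where Python A (and Python B alike) raises IndexError.
def Pre_last_name_lensort (names : List String) : Prop :=
  ∀ s ∈ names, PySem.Str.split₀ s ≠ []
instance (names : List String) : Decidable (Pre_last_name_lensort names) := by
  unfold Pre_last_name_lensort; infer_instance
def pvWitness_last_name_lensort : List String := ["Anna Lee", "Bob Wu", "Cal Lee"]

def Spec_last_name_lensort (names : List String) (out : List String) : Prop := out = last_name_lensort_alt names
instance (names : List String) (out : List String) : Decidable (Spec_last_name_lensort names out) := by unfold Spec_last_name_lensort; infer_instance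

-- ===== CLAIM (what is proved, stated in full; the proofs are below) =====
def Claim_equal_last_name_lensort : Prop := ∀ (names : List String), Dom_last_name_lensort names → Pre_last_name_lensort names → Spec_last_name_lensort names (last_name_lensort names)

-- ===== LEMMAS AND PROOFS =====

-- stable insertion into a mapped list, when the comparator factors through the map
theorem insertBy_map {α β : Type} (f : α → β) (b1 : α → α → Bool) (b2 : β → β → Bool)
    (h : ∀ a a', b2 (f a) (f a') = b1 a a') (x : α) (l : List α) :
    PySem.List.insertBy b2 (f x) (l.map f) = (PySem.List.insertBy b1 x l).map f := by
  induction l with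
  | nil => simp [PySem.List.insertBy]
  | cons y ys ih => simp [PySem.List.insertBy, h]; split_ifs <;> simp [ih]

-- sorting a mapped list = mapping the sorted list (keys factor through the map)
theorem sorted2_map {α β κ₁ κ₂ : Type} [LT κ₁] [DecidableLT κ₁] [LT κ₂] [DecidableLT κ₂]
    (f : α → β) (l : List α) (k1 : β → κ₁) (k2 : β → κ₂) :
    PySem.List.sorted2 (l.map f) k1 k2 =
      (PySem.List.sorted2 l (fun a => k1 (f a)) (fun a => k2 (f a))).map f := by
  unfold PySem.List.sorted2
  simp only [if_neg (by decide : ¬ (false = true))]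
  suffices h : ∀ (acc : List α),
      (l.map f).foldl (fun acc x => PySem.List.insertBy
          (fun a b => decide (k1 a < k1 b) || !decide (k1 b < k1 a) && decide (k2 a < k2 b)) x acc)
          (acc.map f)
        = (l.foldl (fun acc x => PySem.List.insertBy
          (fun a b => decide (k1 (f a) < k1 (f b)) || !decide (k1 (f b) < k1 (f a)) && decide (k2 (f a) < k2 (f b))) x acc) acc).map f by
    simpa using h []
  induction l with
  | nil => intro acc; simp
  | cons x xs ih =>
    intro acc
    simp only [List.map_cons, List.foldl_cons]
    rw [insertBy_map f _ _ (fun a a' => rfl) x acc]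
    exact ih _

-- lookup in A's dict (every stored value depends only on the key)
theorem getD_foldl_insert_keyval {β : Type} (l : List β) (key : β → String) (v : String → Int)
    (d : PySem.Dict String Int) (k : String) (d0 : Int) :
    (l.foldl (fun d x => d.insert (key x) (v (key x))) d).getD k d0 =
      if k ∈ l.map key then v k else d.getD k d0 := by
  induction l generalizing d with
  | nil => simp
  | cons x xs ih =>
    simp only [List.foldl_cons, List.map_cons, List.mem_cons, ih]
    by_cases hm : k ∈ xs.map key
    · simp [hm]
    · by_cases he : k = key x
      · simp [he, PySem.Dict.getD_insert_self]
      · simp [hm, he, PySem.Dict.getD_insert_of_ne _ _ _ he]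

-- A's outer double loop is a flatMap of filters
theorem foldl_outer_eq_flatMap (names : List String) (ys : List (String × Int)) (acc : List String) :
    ys.foldl (fun Final p =>
        names.foldl (fun F name => if p.1 == pvLast name then F ++ [name] else F) Final) acc
      = acc ++ ys.flatMap (fun p => names.filter (fun n => p.1 == pvLast n)) := by
  induction ys generalizing acc with
  | nil => simp
  | cons p ys ih =>
    simp only [List.foldl_cons, List.flatMap_cons]
    rw [PySem.List.foldl_append_if_eq_filter, ih]
    simp [List.append_assoc]

-- lookup in B's grouping dict
theorem groups_getD (names : List String) (d : PySem.Dict String (List String)) (k : String) :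
    (names.foldl (fun d name => d.modify (pvLast name) [] (fun l => l ++ [name])) d).getD k []
      = d.getD k [] ++ names.filter (fun n => pvLast n == k) := by
  induction names generalizing d with
  | nil => simp
  | cons n ns ih =>
    simp only [List.foldl_cons, ih, List.filter_cons]
    by_cases h : k = pvLast n
    · simp [h]
    · simp [PySem.Dict.getD_modify, h, Ne.symm h]

theorem filter_beq_comm (k : String) (names : List String) :
    names.filter (fun n => k == pvLast n) = names.filter (fun n => pvLast n == k) := by
  apply List.filter_congr
  intro x _
  by_cases h : k = pvLast x
  · simp [h]
  · simp [h, Ne.symm h]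

-- ===== VERDICT (by name: the statement is the Claim_ definition above) =====
theorem last_name_lensort_spec : Claim_equal_last_name_lensort := by
  intro names _ _
  unfold Spec_last_name_lensort last_name_lensort last_name_lensort_alt
  simp only []
  -- keys of both dicts: the distinct last names in first-occurrence order
  have hkeysA : (names.foldl (fun d a => d.insert (pvLast a) (PySem.Str.len (pvLast a)))
      PySem.Dict.empty).keys = PySem.Set.ofList (names.map pvLast) := by
    rw [PySem.Dict.keys_foldl_insert_key names pvLast
      (fun d a => PySem.Str.len (pvLast a)) PySem.Dict.empty]
    rw [PySem.Dict.keys_empty]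
    simp [PySem.Set.update, PySem.Set.ofList, PySem.Set.empty]
  have hkeysB : (names.foldl (fun d name => d.modify (pvLast name) []
      (fun l => l ++ [name])) PySem.Dict.empty).keys = PySem.Set.ofList (names.map pvLast) := by
    rw [PySem.Dict.keys_foldl_modify_key names pvLast []
      (fun d name l => l ++ [name]) PySem.Dict.empty]
    rw [PySem.Dict.keys_empty]
    simp [PySem.Set.update, PySem.Set.ofList, PySem.Set.empty]
  -- items of A's dict
  have hitems : (names.foldl (fun d a => d.insert (pvLast a) (PySem.Str.len (pvLast a)))
      PySem.Dict.empty).items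
      = (PySem.Set.ofList (names.map pvLast)).map (fun k => (k, PySem.Str.len k)) := by
    rw [PySem.Dict.items_eq_map_keys _ (by rw [hkeysA]; exact PySem.Set.nodup_ofList _) 0]
    rw [hkeysA]
    apply List.map_congr_left
    intro k hk
    rw [getD_foldl_insert_keyval]
    simp [(PySem.Set.mem_ofList _ _).mp hk]
  rw [hitems, hkeysB]
  rw [sorted2_map (fun k => (k, PySem.Str.len k)) _ (fun x => x.2) (fun x => x.1)]
  rw [foldl_outer_eq_flatMap, PySem.List.foldl_append_eq_flatMap]
  simp only [List.nil_append, List.flatMap_map]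
  simp only [groups_getD, PySem.Dict.getD_empty, List.nil_append, filter_beq_comm]
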